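-- pv_equiv track=rewrite | github.com/SRHgroup/pre_mupexi_variant_calling | research/plot_rna_editing_clusters.py | build_chr_order
-- ===== SOURCE A (Python) =====
-- def build_chr_order(chrs):
--     order = []
--     for c in chrs:
--         s = c.replace('chr', '')
--         if s.isdigit():
--             order.append((0, int(s), c))
--         elif s == 'X':
--             order.append((1, 23, c))
--         elif s == 'Y':
--             order.append((1, 24, c))
--         else:
--             order.append((2, 999, c))
--     return [x[2] for x in sorted(order)]
-- ===== SOURCE B (Python) =====
-- def build_chr_order(chrs):
--     # Bucket once, then sort each bucket and concatenate (numerics, X, Y, rest).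
--     nums, xs, ys, others = [], [], [], []
--     for c in chrs:
--         s = c.replace('chr', '')
--         if s.isdigit():
--             nums.append(c)
--         elif s == 'X':
--             xs.append(c)
--         elif s == 'Y':
--             ys.append(c)
--         else:
--             others.append(c)
--     nums.sort(key=lambda c: (int(c.replace('chr', '')), c))
--     return nums + sorted(xs) + sorted(ys) + sorted(others)
-- ===== Notes on version B (the rewrite author's own statement) =====
-- stated objective: alternative
-- what changed: B replaces A's single composite-key (group,number,name) tuple sort of decorated triples by a one-pass partition into four buckets (numeric / X / Y / other), sorting each bucket with its own simple key and concatenating.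
import Mathlib
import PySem

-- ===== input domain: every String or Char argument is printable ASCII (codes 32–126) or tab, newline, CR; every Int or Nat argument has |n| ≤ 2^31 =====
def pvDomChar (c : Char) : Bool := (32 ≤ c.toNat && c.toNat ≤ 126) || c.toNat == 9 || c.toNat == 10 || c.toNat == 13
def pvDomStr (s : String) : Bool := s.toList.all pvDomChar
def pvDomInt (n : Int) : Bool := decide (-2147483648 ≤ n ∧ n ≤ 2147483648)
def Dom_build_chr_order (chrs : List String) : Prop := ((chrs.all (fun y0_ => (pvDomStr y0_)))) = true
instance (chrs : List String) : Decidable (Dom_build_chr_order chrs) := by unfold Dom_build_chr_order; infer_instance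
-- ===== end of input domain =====

-- B buckets the names in one pass (numeric / X / Y / other) and sorts each bucket separately,
-- instead of A's single composite-key tuple sort; same cost class, alternative decomposition.

-- ===== PORT A =====
-- A-side helper: Python compares the (int, int, str) tuples of sorted(order) lexicographically;
-- the Lex key below is exactly that ordering (Python's str '<' is Lean's String '<').
def pyTripKey (t : Int × Int × String) : Lex (Int × Lex (Int × String)) :=
  toLex (t.1, toLex (t.2.1, t.2.2))

def build_chr_order (chrs : List String) : List String :=
  let order := chrs.foldl (fun acc c =>
    let s := PySem.Str.replace c "chr" ""
    if PySem.Str.strIsdigit s then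
      -- int(s): s is a nonempty all-digit string here, so ofStr? is never none (getD unreachable)
      acc ++ [((0 : Int), (PySem.Int.ofStr? s).getD 0, c)]
    else if s = "X" then acc ++ [((1 : Int), 23, c)]
    else if s = "Y" then acc ++ [((1 : Int), 24, c)]
    else acc ++ [((2 : Int), 999, c)]) []
  (PySem.List.sorted order pyTripKey).map (fun t => t.2.2)

-- ===== PORT B =====
def build_chr_order_alt (chrs : List String) : List String :=
  let b := chrs.foldl
    (fun (b : List String × List String × List String × List String) c =>
      let s := PySem.Str.replace c "chr" ""
      if PySem.Str.strIsdigit s then (b.1 ++ [c], b.2.1, b.2.2.1, b.2.2.2)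
      else if s = "X" then (b.1, b.2.1 ++ [c], b.2.2.1, b.2.2.2)
      else if s = "Y" then (b.1, b.2.1, b.2.2.1 ++ [c], b.2.2.2)
      else (b.1, b.2.1, b.2.2.1, b.2.2.2 ++ [c])) ([], [], [], [])
  -- int(c.replace('chr','')): all-digit string in this bucket, getD unreachable
  PySem.List.sorted2 b.1 (fun c => (PySem.Int.ofStr? (PySem.Str.replace c "chr" "")).getD 0) (fun c => c)
    ++ PySem.List.sorted b.2.1 (fun c => c)
    ++ PySem.List.sorted b.2.2.1 (fun c => c)
    ++ PySem.List.sorted b.2.2.2 (fun c => c)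

-- ===== PRECONDITION & SPEC =====
def Spec_build_chr_order (chrs : List String) (out : List String) : Prop := out = build_chr_order_alt chrs
instance (chrs : List String) (out : List String) : Decidable (Spec_build_chr_order chrs out) := by unfold Spec_build_chr_order; infer_instance

-- ===== CLAIM (what is proved, stated in full; the proofs are below) =====
def Claim_equal_build_chr_order : Prop := ∀ (chrs : List String), Dom_build_chr_order chrs → Spec_build_chr_order chrs (build_chr_order chrs)

-- ===== LEMMAS AND PROOFS =====

-- branch tag of a name: 0 numeric, 1 = X, 2 = Y, 3 other
def pvTag (c : String) : Nat :=
  if PySem.Str.strIsdigit (PySem.Str.replace c "chr" "") then 0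
  else if PySem.Str.replace c "chr" "" = "X" then 1
  else if PySem.Str.replace c "chr" "" = "Y" then 2 else 3

def pvNum (c : String) : Int := (PySem.Int.ofStr? (PySem.Str.replace c "chr" "")).getD 0

-- the decorated triple A builds for a name
def pvTrip (c : String) : Int × Int × String :=
  if PySem.Str.strIsdigit (PySem.Str.replace c "chr" "") then (0, pvNum c, c)
  else if PySem.Str.replace c "chr" "" = "X" then (1, 23, c)
  else if PySem.Str.replace c "chr" "" = "Y" then (1, 24, c)
  else (2, 999, c)

-- the single total key both results are ordered by
def pvKey (c : String) : Lex (Int × Lex (Int × String)) := pyTripKey (pvTrip c)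

lemma pvTrip_snd (c : String) : (pvTrip c).2.2 = c := by
  unfold pvTrip; split_ifs <;> rfl

lemma pvKey_injective : Function.Injective pvKey := by
  intro a b h
  have : (ofLex (ofLex (pvKey a)).2).2 = (ofLex (ofLex (pvKey b)).2).2 := by rw [h]
  simpa [pvKey, pyTripKey, pvTrip_snd] using this

lemma pvTag_spec (c : String) :
    (pvTag c = 0 ∧ PySem.Str.strIsdigit (PySem.Str.replace c "chr" "") = true) ∨
    (pvTag c = 1 ∧ PySem.Str.strIsdigit (PySem.Str.replace c "chr" "") = false ∧
      PySem.Str.replace c "chr" "" = "X") ∨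
    (pvTag c = 2 ∧ PySem.Str.strIsdigit (PySem.Str.replace c "chr" "") = false ∧
      ¬ PySem.Str.replace c "chr" "" = "X" ∧ PySem.Str.replace c "chr" "" = "Y") ∨
    (pvTag c = 3 ∧ PySem.Str.strIsdigit (PySem.Str.replace c "chr" "") = false ∧
      ¬ PySem.Str.replace c "chr" "" = "X" ∧ ¬ PySem.Str.replace c "chr" "" = "Y") := by
  unfold pvTag; split_ifs <;> simp_all

lemma pvTrip_tag0 (c : String) (h : pvTag c = 0) : pvTrip c = (0, pvNum c, c) := by
  unfold pvTag at h; unfold pvTrip; split_ifs at h ⊢ <;> simp_all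

lemma pvTrip_tag1 (c : String) (h : pvTag c = 1) : pvTrip c = (1, 23, c) := by
  unfold pvTag at h; unfold pvTrip; split_ifs at h ⊢ <;> simp_all

lemma pvTrip_tag2 (c : String) (h : pvTag c = 2) : pvTrip c = (1, 24, c) := by
  unfold pvTag at h; unfold pvTrip; split_ifs at h ⊢ <;> simp_all

lemma pvTrip_tag3 (c : String) (h : pvTag c = 3) : pvTrip c = (2, 999, c) := by
  unfold pvTag at h; unfold pvTrip; split_ifs at h ⊢ <;> simp_all

-- A's loop builds exactly map pvTrip
lemma foldA_eq (chrs : List String) (acc : List (Int × Int × String)) :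
    chrs.foldl (fun acc c =>
      let s := PySem.Str.replace c "chr" ""
      if PySem.Str.strIsdigit s then
        acc ++ [((0 : Int), (PySem.Int.ofStr? s).getD 0, c)]
      else if s = "X" then acc ++ [((1 : Int), 23, c)]
      else if s = "Y" then acc ++ [((1 : Int), 24, c)]
      else acc ++ [((2 : Int), 999, c)]) acc
    = acc ++ chrs.map pvTrip := by
  induction chrs generalizing acc with
  | nil => simp
  | cons c l ih =>
    simp only [List.foldl_cons, List.map_cons]
    rw [ih]
    unfold pvTrip pvNum
    split_ifs <;> simp

-- B's loop builds the four tag-filters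
def pvF (i : Nat) (chrs : List String) : List String := chrs.filter (fun c => pvTag c = i)

lemma foldB_eq (chrs : List String) (b : List String × List String × List String × List String) :
    chrs.foldl
      (fun (b : List String × List String × List String × List String) c =>
        let s := PySem.Str.replace c "chr" ""
        if PySem.Str.strIsdigit s then (b.1 ++ [c], b.2.1, b.2.2.1, b.2.2.2)
        else if s = "X" then (b.1, b.2.1 ++ [c], b.2.2.1, b.2.2.2)
        else if s = "Y" then (b.1, b.2.1, b.2.2.1 ++ [c], b.2.2.2)
        else (b.1, b.2.1, b.2.2.1, b.2.2.2 ++ [c])) b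
    = (b.1 ++ pvF 0 chrs, b.2.1 ++ pvF 1 chrs, b.2.2.1 ++ pvF 2 chrs, b.2.2.2 ++ pvF 3 chrs) := by
  induction chrs generalizing b with
  | nil => simp [pvF]
  | cons c l ih =>
    simp only [List.foldl_cons]
    rw [ih]
    rcases pvTag_spec c with ⟨ht, h1⟩ | ⟨ht, h1, h2⟩ | ⟨ht, h1, h2, h3⟩ | ⟨ht, h1, h2, h3⟩
    · simp only [h1]
      simp [pvF, ht]
    · simp only [h1]
      simp only [h2]
      simp [pvF, ht]
    · simp only [h1]
      simp only [h3]
      simp [pvF, ht]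
    · simp only [h1]
      simp only [h2, h3]
      simp [pvF, ht]

-- the four filters are a permutation of the input
lemma filters_perm (chrs : List String) :
    (pvF 0 chrs ++ pvF 1 chrs ++ pvF 2 chrs ++ pvF 3 chrs).Perm chrs := by
  induction chrs with
  | nil => simp [pvF]
  | cons c l ih =>
    have h4 : pvTag c = 0 ∨ pvTag c = 1 ∨ pvTag c = 2 ∨ pvTag c = 3 := by
      rcases pvTag_spec c with ⟨h, -⟩ | ⟨h, -⟩ | ⟨h, -⟩ | ⟨h, -⟩ <;> omega
    have hF : ∀ i, pvF i (c :: l) = if pvTag c = i then c :: pvF i l else pvF i l := by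
      intro i; simp only [pvF, List.filter_cons]; by_cases h : pvTag c = i <;> simp [h]
    rcases h4 with h | h | h | h <;> simp only [hF, h] <;> norm_num
    · exact (by simpa using ih)
    · exact List.perm_middle.trans (List.Perm.cons c (by simpa using ih))
    · have e1 : pvF 0 l ++ (pvF 1 l ++ c :: (pvF 2 l ++ pvF 3 l))
          = (pvF 0 l ++ pvF 1 l) ++ c :: (pvF 2 l ++ pvF 3 l) := by simp
      rw [e1]
      exact List.perm_middle.trans (List.Perm.cons c (by simpa using ih))
    · have e1 : pvF 0 l ++ (pvF 1 l ++ (pvF 2 l ++ c :: pvF 3 l))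
          = (pvF 0 l ++ (pvF 1 l ++ pvF 2 l)) ++ c :: pvF 3 l := by simp
      rw [e1]
      exact List.perm_middle.trans (List.Perm.cons c (by simpa using ih))

-- sorted2 with (k1, identity) is sorted with the corresponding lex key
lemma sorted2_eq_sorted_lex (xs : List String) (k1 : String → Int) :
    PySem.List.sorted2 xs k1 (fun c => c)
    = PySem.List.sorted xs (fun c => toLex (k1 c, c)) := by
  have hfun : (fun (a b : String) => decide (k1 a < k1 b) || (!decide (k1 b < k1 a) && decide (a < b)))
      = (fun a b => decide ((toLex (k1 a, a) : Lex (Int × String)) < toLex (k1 b, b))) := by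
    funext a b
    simp only [Prod.Lex.lt_iff, ofLex_toLex]
    rcases lt_trichotomy (k1 a) (k1 b) with hlt | heq | hgt
    · simp [hlt]
    · simp [heq]
    · simp [hgt, asymm hgt, ne_of_gt hgt]
  show List.foldl (fun acc x => PySem.List.insertBy
      (fun a b => decide (k1 a < k1 b) || (!decide (k1 b < k1 a) && decide (a < b))) x acc) [] xs
    = List.foldl (fun acc x => PySem.List.insertBy
      (fun a b => decide ((toLex (k1 a, a) : Lex (Int × String)) < toLex (k1 b, b))) x acc) [] xs
  rw [hfun]

lemma key_tag0_le {c d : String} (hc : pvTag c = 0) (hd : pvTag d = 0)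
    (h : (toLex (pvNum c, c) : Lex (Int × String)) ≤ toLex (pvNum d, d)) : pvKey c ≤ pvKey d := by
  unfold pvKey pyTripKey
  rw [pvTrip_tag0 c hc, pvTrip_tag0 d hd]
  rw [Prod.Lex.le_iff]
  exact Or.inr ⟨rfl, by simpa using h⟩

lemma key_same_tag_le {c d : String} {i : Nat} (hi : i ≠ 0) (hc : pvTag c = i) (hd : pvTag d = i)
    (h : c ≤ d) : pvKey c ≤ pvKey d := by
  have h4 : i = 1 ∨ i = 2 ∨ i = 3 := by
    rcases pvTag_spec c with ⟨h', -⟩ | ⟨h', -⟩ | ⟨h', -⟩ | ⟨h', -⟩ <;> omega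
  unfold pvKey pyTripKey
  rcases h4 with rfl | rfl | rfl
  · rw [pvTrip_tag1 c hc, pvTrip_tag1 d hd]; simp [Prod.Lex.le_iff, h]
  · rw [pvTrip_tag2 c hc, pvTrip_tag2 d hd]; simp [Prod.Lex.le_iff, h]
  · rw [pvTrip_tag3 c hc, pvTrip_tag3 d hd]; simp [Prod.Lex.le_iff, h]

lemma key_tag_lt_le {c d : String} (h : pvTag c < pvTag d) : pvKey c ≤ pvKey d := by
  have h4c : pvTag c = 0 ∨ pvTag c = 1 ∨ pvTag c = 2 ∨ pvTag c = 3 := by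
    rcases pvTag_spec c with ⟨h', -⟩ | ⟨h', -⟩ | ⟨h', -⟩ | ⟨h', -⟩ <;> omega
  have h4d : pvTag d = 0 ∨ pvTag d = 1 ∨ pvTag d = 2 ∨ pvTag d = 3 := by
    rcases pvTag_spec d with ⟨h', -⟩ | ⟨h', -⟩ | ⟨h', -⟩ | ⟨h', -⟩ <;> omega
  unfold pvKey pyTripKey
  rcases h4c with hc | hc | hc | hc <;> rcases h4d with hd | hd | hd | hd <;>
    rw [hc, hd] at h <;> try omega
  · rw [pvTrip_tag0 c hc, pvTrip_tag1 d hd]; simp [Prod.Lex.le_iff]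
  · rw [pvTrip_tag0 c hc, pvTrip_tag2 d hd]; simp [Prod.Lex.le_iff]
  · rw [pvTrip_tag0 c hc, pvTrip_tag3 d hd]; simp [Prod.Lex.le_iff]
  · rw [pvTrip_tag1 c hc, pvTrip_tag2 d hd]; simp [Prod.Lex.le_iff]
  · rw [pvTrip_tag1 c hc, pvTrip_tag3 d hd]; simp [Prod.Lex.le_iff]
  · rw [pvTrip_tag2 c hc, pvTrip_tag3 d hd]; simp [Prod.Lex.le_iff]

lemma tag_of_mem_pvF {c : String} {i : Nat} {l : List String} (h : c ∈ pvF i l) : pvTag c = i := by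
  simpa using (List.mem_filter.mp h).2

-- pairwise key-monotonicity of each sorted bucket
lemma pw_bucket0 (chrs : List String) :
    List.Pairwise (fun a b => pvKey a ≤ pvKey b)
      (PySem.List.sorted2 (pvF 0 chrs)
        (fun c => (PySem.Int.ofStr? (PySem.Str.replace c "chr" "")).getD 0) (fun c => c)) := by
  rw [sorted2_eq_sorted_lex]
  have hp := PySem.List.sorted_pairwise (pvF 0 chrs)
      (fun c => (toLex ((PySem.Int.ofStr? (PySem.Str.replace c "chr" "")).getD 0, c) : Lex (Int × String)))
  refine (List.Pairwise.and_mem.mp hp).imp ?_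
  rintro a b ⟨ha, hb, hle⟩
  have ta : pvTag a = 0 := tag_of_mem_pvF ((PySem.List.mem_sorted _ _ _ _).mp ha)
  have tb : pvTag b = 0 := tag_of_mem_pvF ((PySem.List.mem_sorted _ _ _ _).mp hb)
  exact key_tag0_le ta tb hle

lemma pw_bucket_id (chrs : List String) (i : Nat) (hi : i ≠ 0) :
    List.Pairwise (fun a b => pvKey a ≤ pvKey b)
      (PySem.List.sorted (pvF i chrs) (fun c => c)) := by
  have hp := PySem.List.sorted_pairwise (pvF i chrs) (fun c => c)
  refine (List.Pairwise.and_mem.mp hp).imp ?_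
  rintro a b ⟨ha, hb, hle⟩
  have ta : pvTag a = i := tag_of_mem_pvF ((PySem.List.mem_sorted _ _ _ _).mp ha)
  have tb : pvTag b = i := tag_of_mem_pvF ((PySem.List.mem_sorted _ _ _ _).mp hb)
  exact key_same_tag_le hi ta tb hle

-- main equality
lemma main_eq (chrs : List String) : build_chr_order chrs = build_chr_order_alt chrs := by
  have hA : build_chr_order chrs
      = (PySem.List.sorted (chrs.map pvTrip) pyTripKey).map (fun t => t.2.2) := by
    unfold build_chr_order
    rw [foldA_eq]
    simp
  have hB : build_chr_order_alt chrs
      = PySem.List.sorted2 (pvF 0 chrs)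
          (fun c => (PySem.Int.ofStr? (PySem.Str.replace c "chr" "")).getD 0) (fun c => c)
        ++ PySem.List.sorted (pvF 1 chrs) (fun c => c)
        ++ PySem.List.sorted (pvF 2 chrs) (fun c => c)
        ++ PySem.List.sorted (pvF 3 chrs) (fun c => c) := by
    unfold build_chr_order_alt
    rw [foldB_eq]
    simp
  rw [hA, hB]
  apply PySem.List.eq_of_perm_of_pairwise_le_of_injective pvKey pvKey_injective
  · -- permutation: both sides rearrange chrs
    have p1 : ((PySem.List.sorted (chrs.map pvTrip) pyTripKey).map (fun t => t.2.2)).Perm chrs := by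
      have h := (PySem.List.sorted_perm (chrs.map pvTrip) pyTripKey false).map (fun t => t.2.2)
      have h2 : (chrs.map pvTrip).map (fun t => t.2.2) = chrs := by
        rw [List.map_map]
        exact List.map_congr_left (fun c _ => pvTrip_snd c) |>.trans (List.map_id chrs)
      rwa [h2] at h
    have p2 : (PySem.List.sorted2 (pvF 0 chrs)
          (fun c => (PySem.Int.ofStr? (PySem.Str.replace c "chr" "")).getD 0) (fun c => c)
        ++ PySem.List.sorted (pvF 1 chrs) (fun c => c)
        ++ PySem.List.sorted (pvF 2 chrs) (fun c => c)
        ++ PySem.List.sorted (pvF 3 chrs) (fun c => c)).Perm chrs := by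
      refine List.Perm.trans ?_ (filters_perm chrs)
      exact (((PySem.List.sorted2_perm _ _ _ false).append
              (PySem.List.sorted_perm _ _ false)).append
              (PySem.List.sorted_perm _ _ false)).append
              (PySem.List.sorted_perm _ _ false)
    exact p1.trans p2.symm
  · -- A's side is key-sorted
    rw [List.pairwise_map]
    have hp := PySem.List.sorted_pairwise (chrs.map pvTrip) pyTripKey
    refine (List.Pairwise.and_mem.mp hp).imp ?_
    rintro a b ⟨ha, hb, hle⟩
    have ha' : pvTrip a.2.2 = a := by
      obtain ⟨c, -, rfl⟩ := List.mem_map.mp ((PySem.List.mem_sorted _ _ _ _).mp ha)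
      rw [pvTrip_snd]
    have hb' : pvTrip b.2.2 = b := by
      obtain ⟨c, -, rfl⟩ := List.mem_map.mp ((PySem.List.mem_sorted _ _ _ _).mp hb)
      rw [pvTrip_snd]
    show pvKey a.2.2 ≤ pvKey b.2.2
    unfold pvKey
    rw [ha', hb']
    exact hle
  · -- B's side is key-sorted
    simp only [List.pairwise_append]
    refine ⟨⟨⟨pw_bucket0 chrs, pw_bucket_id chrs 1 (by omega), ?_⟩,
            pw_bucket_id chrs 2 (by omega), ?_⟩,
            pw_bucket_id chrs 3 (by omega), ?_⟩
    · intro a ha b hb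
      have ta := tag_of_mem_pvF ((PySem.List.mem_sorted _ _ _ _).mp (by
        rw [sorted2_eq_sorted_lex] at ha; exact ha))
      have tb := tag_of_mem_pvF ((PySem.List.mem_sorted _ _ _ _).mp hb)
      exact key_tag_lt_le (by rw [ta, tb]; omega)
    · intro a ha b hb
      rcases List.mem_append.mp ha with ha | ha
      · have ta := tag_of_mem_pvF ((PySem.List.mem_sorted _ _ _ _).mp (by
          rw [sorted2_eq_sorted_lex] at ha; exact ha))
        have tb := tag_of_mem_pvF ((PySem.List.mem_sorted _ _ _ _).mp hb)
        exact key_tag_lt_le (by rw [ta, tb]; omega)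
      · have ta := tag_of_mem_pvF ((PySem.List.mem_sorted _ _ _ _).mp ha)
        have tb := tag_of_mem_pvF ((PySem.List.mem_sorted _ _ _ _).mp hb)
        exact key_tag_lt_le (by rw [ta, tb]; omega)
    · intro a ha b hb
      have tb := tag_of_mem_pvF ((PySem.List.mem_sorted _ _ _ _).mp hb)
      rcases List.mem_append.mp ha with ha | ha
      · rcases List.mem_append.mp ha with ha | ha
        · have ta := tag_of_mem_pvF ((PySem.List.mem_sorted _ _ _ _).mp (by
            rw [sorted2_eq_sorted_lex] at ha; exact ha))
          exact key_tag_lt_le (by rw [ta, tb]; omega)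
        · have ta := tag_of_mem_pvF ((PySem.List.mem_sorted _ _ _ _).mp ha)
          exact key_tag_lt_le (by rw [ta, tb]; omega)
      · have ta := tag_of_mem_pvF ((PySem.List.mem_sorted _ _ _ _).mp ha)
        exact key_tag_lt_le (by rw [ta, tb]; omega)

-- ===== VERDICT (by name: the statement is the Claim_ definition above) =====
theorem build_chr_order_spec : Claim_equal_build_chr_order := by
  intro chrs _
  unfold Spec_build_chr_order
  exact main_eq chrs
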